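-- pv_equiv track=rewrite | github.com/molodious/mpep-dashboard | build_all_problems.py | extract_oh_qa
-- ===== SOURCE A (Python) =====
-- def extract_oh_qa(transcript_text, oh_number):
--     """Extract Q&A from transcript text, return formatted HTML"""
--     if not transcript_text or len(transcript_text.strip()) < 50:
--         return None
--
--     # Clean up the transcript
--     text = transcript_text.strip()
--
--     # Try to extract key teaching points
--     # Look for question-answer patterns
--     lines = text.split('\n')
--     key_points = []
--     current_point = []
--
--     for line in lines:
--         line = line.strip()
--         if not line:
--             if current_point:
--                 key_points.append(' '.join(current_point))
--                 current_point = []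
--             continue
--         current_point.append(line)
--     if current_point:
--         key_points.append(' '.join(current_point))
--
--     # Take the most substantive paragraphs
--     key_points = [p for p in key_points if len(p) > 30]
--     if not key_points:
--         return None
--
--     # Use first paragraph as question context and rest as answer
--     question = key_points[0][:200] if key_points else "Discussion about this problem"
--     answer = ' '.join(key_points[1:3])[:500] if len(key_points) > 1 else key_points[0][:500]
--
--     return {
--         'oh_number': oh_number,
--         'question': clean_html_text(question),
--         'answer': clean_html_text(answer)
--     }
--
-- def clean_html_text(text):
--     """Escape HTML special characters"""
--     text = text.replace('&', '&amp;')
--     text = text.replace('<', '&lt;')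
--     text = text.replace('>', '&gt;')
--     text = text.replace('"', '&quot;')
--     return text
-- ===== SOURCE B (Python) =====
-- def clean_html_text(text):
--     """Escape HTML special characters"""
--     text = text.replace('&', '&amp;')
--     text = text.replace('<', '&lt;')
--     text = text.replace('>', '&gt;')
--     text = text.replace('"', '&quot;')
--     return text
--
--
-- def extract_oh_qa(transcript_text, oh_number):
--     """Extract Q&A from transcript text, return formatted HTML"""
--     if not transcript_text or len(transcript_text.strip()) < 50:
--         return None
--
--     # Strip every line once, then read off maximal runs of non-blank lines
--     # with two index pointers instead of a flush-on-blank accumulator.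
--     stripped = [ln.strip() for ln in transcript_text.strip().split('\n')]
--     n = len(stripped)
--     paragraphs = []
--     i = 0
--     while i < n:
--         if stripped[i]:
--             j = i
--             while j < n and stripped[j]:
--                 j += 1
--             paragraphs.append(' '.join(stripped[i:j]))
--             i = j
--         else:
--             i += 1
--
--     key_points = [p for p in paragraphs if len(p) > 30]
--     if not key_points:
--         return None
--
--     question, *more = key_points
--     answer = ' '.join(more[:2]) if more else question
--     return {
--         'oh_number': oh_number,
--         'question': clean_html_text(question[:200]),
--         'answer': clean_html_text(answer[:500]),
--     }
-- ===== Notes on version B (the rewrite author's own statement) =====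
-- stated objective: alternative
-- what changed: A's flush-on-blank accumulator loop (current_point flushed into key_points on each blank line) is replaced by a two-pointer scan over the pre-stripped lines that locates each maximal run of non-blank lines and joins it directly; the question/answer assembly is folded into a single destructuring of the filtered paragraph list.
import Mathlib
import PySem

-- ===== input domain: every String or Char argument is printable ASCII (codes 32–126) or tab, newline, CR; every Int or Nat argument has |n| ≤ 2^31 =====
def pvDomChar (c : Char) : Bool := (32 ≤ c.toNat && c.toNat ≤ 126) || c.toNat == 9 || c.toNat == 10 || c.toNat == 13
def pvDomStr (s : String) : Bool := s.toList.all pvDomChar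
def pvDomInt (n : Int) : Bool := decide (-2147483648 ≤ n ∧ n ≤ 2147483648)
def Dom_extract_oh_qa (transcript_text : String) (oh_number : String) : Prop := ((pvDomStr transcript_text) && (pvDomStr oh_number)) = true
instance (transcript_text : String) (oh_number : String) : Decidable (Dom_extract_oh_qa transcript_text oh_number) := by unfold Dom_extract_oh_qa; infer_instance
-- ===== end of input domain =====

-- B replaces A's flush-on-blank accumulator loop with a two-pointer scan over the
-- pre-stripped lines that reads off each maximal run of non-blank lines directly
-- (objective: alternative decomposition, same cost).

-- ===== PORT A =====
-- helper clean_html_text, shared verbatim by both Pythons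
def pvCleanHtml (t : String) : String :=
  PySem.Str.replace (PySem.Str.replace (PySem.Str.replace
    (PySem.Str.replace t "&" "&amp;") "<" "&lt;") ">" "&gt;") "\"" "&quot;"

def extract_oh_qa (transcript_text : String) (oh_number : String) :
    Option (List (String × String)) :=
  if transcript_text = "" ∨ PySem.Str.len (PySem.Str.strip transcript_text) < 50 then none
  else
    let text := PySem.Str.strip transcript_text
    -- split('\n'): the separator is non-empty, so split? is always `some`
    let lines := (PySem.Str.split? text "\n").getD []
    let st := lines.foldl (fun (st : List String × List String) line =>
        let l := PySem.Str.strip line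
        if l = "" then
          (if st.2 ≠ [] then (st.1 ++ [PySem.Str.join " " st.2], []) else st)
        else (st.1, st.2 ++ [l])) (([], []) : List String × List String)
    let kps := if st.2 ≠ [] then st.1 ++ [PySem.Str.join " " st.2] else st.1
    let key_points := kps.filter (fun p => 30 < PySem.Str.len p)
    if key_points = [] then none
    else
      let question := if key_points ≠ [] then
          PySem.Str.slice (key_points.headD "") none (some 200)
        else "Discussion about this problem"
      let answer := if 1 < key_points.length then
          PySem.Str.slice (PySem.Str.join " " (PySem.List.slice key_points (some 1) (some 3))) none (some 500)
        else PySem.Str.slice (key_points.headD "") none (some 500)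
      some [("oh_number", oh_number), ("question", pvCleanHtml question),
            ("answer", pvCleanHtml answer)]

-- ===== PORT B =====
-- inner while of Source B: first index j ≥ i with stripped[j] blank (or n)
def pvRunEnd (arr : List String) (j : Nat) : Nat :=
  if h : j < arr.length then
    if arr[j] ≠ "" then pvRunEnd arr (j + 1) else j
  else j
termination_by arr.length - j

-- needed for pvParas's termination
theorem le_pvRunEnd (arr : List String) (j : Nat) : j ≤ pvRunEnd arr j := by
  fun_induction pvRunEnd arr j with
  | case1 j h hne ih => omega
  | case2 j h hne => omega
  | case3 j h => omega

theorem lt_pvRunEnd (arr : List String) (i : Nat) (h : i < arr.length)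
    (hne : arr[i] ≠ "") : i < pvRunEnd arr i := by
  have h1 := le_pvRunEnd arr (i + 1)
  rw [pvRunEnd]
  simp only [h, dif_pos, hne, ne_eq, not_false_eq_true, if_pos]
  omega

-- outer while of Source B: collect one paragraph per maximal run of non-blank lines
def pvParas (arr : List String) (i : Nat) : List String :=
  if h : i < arr.length then
    if hne : arr[i] ≠ "" then
      PySem.Str.join " " (PySem.List.slice arr (some (i : Int)) (some ((pvRunEnd arr i) : Int))) ::
        pvParas arr (pvRunEnd arr i)
    else pvParas arr (i + 1)
  else []
termination_by arr.length - i
decreasing_by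
  · have := lt_pvRunEnd arr i h hne; omega
  · omega

def extract_oh_qa_alt (transcript_text : String) (oh_number : String) :
    Option (List (String × String)) :=
  if transcript_text = "" ∨ PySem.Str.len (PySem.Str.strip transcript_text) < 50 then none
  else
    let stripped := ((PySem.Str.split? (PySem.Str.strip transcript_text) "\n").getD []).map PySem.Str.strip
    let key_points := (pvParas stripped 0).filter (fun p => 30 < PySem.Str.len p)
    match key_points with
    | [] => none
    | q :: more =>
      let answer := match more with
        | [] => q
        | _ => PySem.Str.join " " (PySem.List.slice more none (some 2))
      some [("oh_number", oh_number),
            ("question", pvCleanHtml (PySem.Str.slice q none (some 200))),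
            ("answer", pvCleanHtml (PySem.Str.slice answer none (some 500)))]

-- ===== PRECONDITION & SPEC =====
def Spec_extract_oh_qa (transcript_text : String) (oh_number : String) (out : Option (List (String × String))) : Prop := out = extract_oh_qa_alt transcript_text oh_number
instance (transcript_text : String) (oh_number : String) (out : Option (List (String × String))) : Decidable (Spec_extract_oh_qa transcript_text oh_number out) := by unfold Spec_extract_oh_qa; infer_instance

-- ===== CLAIM (what is proved, stated in full; the proofs are below) =====
def Claim_equal_extract_oh_qa : Prop := ∀ (transcript_text : String) (oh_number : String), Dom_extract_oh_qa transcript_text oh_number → Spec_extract_oh_qa transcript_text oh_number (extract_oh_qa transcript_text oh_number)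

-- ===== LEMMAS AND PROOFS =====
-- the "non-blank" predicate, named once so every lemma states it identically
def pvNB (s : String) : Bool := decide (s ≠ "")

-- reference grouping: A's accumulator loop written as structural recursion
def pvGroup : List String → List String → List String
  | cur, [] => if cur = [] then [] else [PySem.Str.join " " cur]
  | cur, s :: r =>
    if s = "" then
      (if cur = [] then pvGroup [] r else PySem.Str.join " " cur :: pvGroup [] r)
    else pvGroup (cur ++ [s]) r

-- A's loop body and final flush, named for the proofs
def pvStepA (st : List String × List String) (l : String) : List String × List String :=
  if l = "" then
    (if st.2 ≠ [] then (st.1 ++ [PySem.Str.join " " st.2], []) else st)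
  else (st.1, st.2 ++ [l])

def pvFin (st : List String × List String) : List String :=
  if st.2 ≠ [] then st.1 ++ [PySem.Str.join " " st.2] else st.1

theorem foldA_eq_pvGroup (L : List String) (kps cur : List String) :
    pvFin (L.foldl pvStepA (kps, cur)) = kps ++ pvGroup cur L := by
  induction L generalizing kps cur with
  | nil =>
    by_cases hc : cur = [] <;> simp [pvFin, pvGroup, hc]
  | cons s r ih =>
    rw [List.foldl_cons]
    by_cases hs : s = ""
    · by_cases hc : cur = []
      · have hstep : pvStepA (kps, cur) s = (kps, cur) := by simp [pvStepA, hs, hc]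
        rw [hstep, ih]
        subst hc
        simp [pvGroup, hs]
      · have hstep : pvStepA (kps, cur) s = (kps ++ [PySem.Str.join " " cur], []) := by
          simp [pvStepA, hs, hc]
        rw [hstep, ih]
        simp [pvGroup, hs, hc]
    · have hstep : pvStepA (kps, cur) s = (kps, cur ++ [s]) := by simp [pvStepA, hs]
      rw [hstep, ih]
      simp [pvGroup, hs]

theorem pvGroup_span (L : List String) (cur : List String) (hc : cur ≠ []) :
    pvGroup cur L =
      PySem.Str.join " " (cur ++ L.takeWhile pvNB) :: pvGroup [] (L.dropWhile pvNB) := by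
  induction L generalizing cur with
  | nil => simp [pvGroup, hc]
  | cons s r ih =>
    by_cases hs : s = ""
    · subst hs
      simp [pvGroup, hc, List.takeWhile_cons, List.dropWhile_cons, pvNB]
    · rw [show pvGroup cur (s :: r) = pvGroup (cur ++ [s]) r by simp [pvGroup, hs]]
      rw [ih (cur ++ [s]) (by simp)]
      simp [List.takeWhile_cons, List.dropWhile_cons, pvNB, hs]

theorem pvGroup_cons_ne (s : String) (r : List String) (hs : s ≠ "") :
    pvGroup [] (s :: r) =
      PySem.Str.join " " ((s :: r).takeWhile pvNB) :: pvGroup [] ((s :: r).dropWhile pvNB) := by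
  rw [show pvGroup [] (s :: r) = pvGroup [s] r by simp [pvGroup, hs]]
  rw [pvGroup_span r [s] (by simp)]
  simp [List.takeWhile_cons, List.dropWhile_cons, pvNB, hs]

theorem take_len_takeWhile (p : String → Bool) (l : List String) :
    l.take ((l.takeWhile p).length) = l.takeWhile p := by
  induction l with
  | nil => simp
  | cons a r ih => by_cases hp : p a <;> simp [List.takeWhile_cons, hp, ih]

theorem drop_len_takeWhile (p : String → Bool) (l : List String) :
    l.drop ((l.takeWhile p).length) = l.dropWhile p := by
  induction l with
  | nil => simp
  | cons a r ih => by_cases hp : p a <;> simp [List.takeWhile_cons, List.dropWhile_cons, hp, ih]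

theorem pvRunEnd_eq (arr : List String) (i : Nat) :
    pvRunEnd arr i = i + ((arr.drop i).takeWhile pvNB).length := by
  fun_induction pvRunEnd arr i with
  | case1 j h hne ih =>
    rw [List.drop_eq_getElem_cons h, List.takeWhile_cons]
    have : pvNB arr[j] = true := by simp [pvNB, hne]
    rw [this]
    simp only [if_true, List.length_cons]
    omega
  | case2 j h hne =>
    rw [List.drop_eq_getElem_cons h, List.takeWhile_cons]
    have : pvNB arr[j] = false := by simpa [pvNB] using hne
    rw [this]
    simp
  | case3 j h =>
    have : arr.length ≤ j := by omega
    simp [List.drop_eq_nil_of_le this]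

theorem pvParas_eq_pvGroup (arr : List String) (i : Nat) :
    pvParas arr i = pvGroup [] (arr.drop i) := by
  fun_induction pvParas arr i with
  | case1 i h hne ih =>
    have hj := pvRunEnd_eq arr i
    have hslice : PySem.List.slice arr (some (i : Int)) (some ((pvRunEnd arr i) : Int))
        = (arr.drop i).takeWhile pvNB := by
      have h2 : ((pvRunEnd arr i : Nat) : Int)
          = (i : Int) + ((((arr.drop i).takeWhile pvNB).length : Nat) : Int) := by
        rw [hj]; push_cast; ring
      rw [h2, PySem.List.slice_natCast_add, take_len_takeWhile]
    have hdropj : arr.drop (pvRunEnd arr i) = (arr.drop i).dropWhile pvNB := by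
      rw [hj, ← List.drop_drop, drop_len_takeWhile]
    have hcons : arr.drop i = arr[i] :: arr.drop (i + 1) := List.drop_eq_getElem_cons h
    rw [ih, hslice, hdropj, hcons]
    exact (pvGroup_cons_ne arr[i] (arr.drop (i + 1)) hne).symm
  | case2 i h hne ih =>
    simp only [ne_eq, not_not] at hne
    rw [ih, List.drop_eq_getElem_cons h, hne]
    simp [pvGroup]
  | case3 i h =>
    have : arr.length ≤ i := by omega
    simp [List.drop_eq_nil_of_le this, pvGroup]

theorem keyPoints_eq (lines : List String) :
    (let st := lines.foldl (fun (st : List String × List String) line =>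
        let l := PySem.Str.strip line
        if l = "" then
          (if st.2 ≠ [] then (st.1 ++ [PySem.Str.join " " st.2], []) else st)
        else (st.1, st.2 ++ [l])) (([], []) : List String × List String)
     if st.2 ≠ [] then st.1 ++ [PySem.Str.join " " st.2] else st.1)
    = pvParas (lines.map PySem.Str.strip) 0 := by
  show pvFin (lines.foldl (fun st line => pvStepA st (PySem.Str.strip line)) ([], []))
      = pvParas (lines.map PySem.Str.strip) 0
  rw [← List.foldl_map, foldA_eq_pvGroup, pvParas_eq_pvGroup, List.drop_zero, List.nil_append]

-- ===== VERDICT (by name: the statement is the Claim_ definition above) =====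
theorem extract_oh_qa_spec : Claim_equal_extract_oh_qa := by
  intro tt oh _
  unfold Spec_extract_oh_qa extract_oh_qa extract_oh_qa_alt
  by_cases hg : tt = "" ∨ PySem.Str.len (PySem.Str.strip tt) < 50
  · simp only [hg, if_pos]
  · simp only [hg, if_neg, if_false]
    have hk := keyPoints_eq ((PySem.Str.split? (PySem.Str.strip tt) "\n").getD [])
    simp only at hk
    rw [hk]
    match hm : (pvParas (((PySem.Str.split? (PySem.Str.strip tt) "\n").getD []).map PySem.Str.strip) 0).filter
        (fun p => 30 < PySem.Str.len p) with
    | [] => simp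
    | q :: more =>
      simp only [ne_eq, reduceCtorEq, not_false_eq_true, if_pos, if_neg,
        List.headD_cons, List.length_cons]
      match more with
      | [] => simp
      | m :: rest =>
        have hlen : 1 < (q :: m :: rest).length := by simp
        simp only [hlen, if_pos, List.length_cons]
        have h1 : PySem.List.slice (q :: m :: rest) (some ((1:Nat) : Int)) (some ((3:Nat) : Int))
            = ((q :: m :: rest).drop 1).take 2 := by
          rw [PySem.List.slice_natCast]
        have h2 : PySem.List.slice (m :: rest) none (some ((2:Nat) : Int))
            = (m :: rest).take 2 := PySem.List.slice_to_natCast _ _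
        simp only [Nat.cast_ofNat, Nat.cast_one] at h1 h2
        rw [h1, h2]
        simp
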